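-- pv_equiv track=rewrite | github.com/SanaNavya/Dynamic-Programming | Day-9.py | findAllIndices
-- ===== SOURCE A (Python) =====
-- def findAllIndices(nums, k, target):
--     n = len(nums)
--     currTotal = sum(nums[:k])
--     result = []
--     if currTotal == target:
--         result.append(0)
--
--     left, right = 0, k
--     while right < n:
--         currTotal -= nums[left]
--         currTotal += nums[right]
--         if currTotal == target:
--             result.append(left + 1)
--         left += 1
--         right += 1
--     return result
-- ===== SOURCE B (Python) =====
-- def findAllIndices(nums, k, target):
--     n = len(nums)
--     P = [0]
--     for x in nums:
--         P.append(P[-1] + x)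
--     return [s for s in range(n - k + 1) if P[s + k] - P[s] == target]
-- ===== Notes on version B (the rewrite author's own statement) =====
-- stated objective: alternative
-- what changed: Replaces A's incremental sliding-window running sum with a prefix-sum table built once and a single uniform comprehension over all window starts, reading each window sum as a difference of two table entries; Pre_ excludes negative k, on which A always raises IndexError.
-- intended difference: When k > len(nums) and sum(nums) == target, A returns [0] because its initial check sums the silently-truncated slice nums[:k] (the whole array), while B returns [] since no window of length k exists; [] is the intended answer. — e.g. on findAllIndices([1], 2, 1): A returns [0], B returns []
import Mathlib
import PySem

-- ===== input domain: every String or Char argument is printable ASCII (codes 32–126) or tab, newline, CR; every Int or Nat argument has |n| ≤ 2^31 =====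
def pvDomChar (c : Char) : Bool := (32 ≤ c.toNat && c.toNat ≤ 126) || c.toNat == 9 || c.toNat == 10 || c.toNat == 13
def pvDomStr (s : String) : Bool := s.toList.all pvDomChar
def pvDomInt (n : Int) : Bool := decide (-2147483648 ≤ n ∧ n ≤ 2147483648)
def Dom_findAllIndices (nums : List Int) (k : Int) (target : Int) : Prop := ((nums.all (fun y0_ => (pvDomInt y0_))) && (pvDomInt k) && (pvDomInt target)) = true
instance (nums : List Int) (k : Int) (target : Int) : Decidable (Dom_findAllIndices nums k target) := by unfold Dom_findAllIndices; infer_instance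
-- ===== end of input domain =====

-- B replaces A's incremental sliding-window running sum with a prefix-sum table and one
-- uniform pass over all window starts (alternative decomposition, same cost).

-- ===== PORT A =====
-- while right < n: update currTotal, maybe append left+1, advance; fuel = n - right iterations
def findAllIndicesLoop (nums : List Int) (target : Int) :
    Nat → Int → Int → Int → List Int → List Int
  | 0, _, _, _, result => result
  | fuel+1, currTotal, left, right, result =>
    match PySem.List.pyGet? nums left, PySem.List.pyGet? nums right with
    | some a, some b =>
      let t := currTotal - a + b
      findAllIndicesLoop nums target fuel t (left+1) (right+1)
        (if t = target then result ++ [left+1] else result)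
    | _, _ => result  -- IndexError in Python; outside Pre_

def findAllIndices (nums : List Int) (k : Int) (target : Int) : List Int :=
  let n : Int := nums.length
  let currTotal := (PySem.List.slice nums none (some k)).sum
  let result : List Int := if currTotal = target then [0] else []
  findAllIndicesLoop nums target (n - k).toNat currTotal 0 k result

-- ===== PORT B =====
-- P = [0]; for x in nums: P.append(P[-1] + x)
def buildPrefix (nums : List Int) : List Int :=
  nums.foldl (fun p x => p ++ [p.getLastD 0 + x]) [0]

-- [s for s in range(n - k + 1) if P[s + k] - P[s] == target]
def findAllIndices_alt (nums : List Int) (k : Int) (target : Int) : List Int :=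
  let n : Int := nums.length
  let P := buildPrefix nums
  (PySem.List.pyRange 0 (n - k + 1) 1).filter
    (fun s => PySem.List.pyGetD P (s + k) 0 - PySem.List.pyGetD P s 0 = target)

-- ===== PRECONDITION & SPEC =====
-- Pre_ excludes negative k only: there Python A always raises IndexError
-- (for empty nums at nums[left] immediately, otherwise once left reaches len(nums)).
def Pre_findAllIndices (nums : List Int) (k : Int) (target : Int) : Prop := 0 ≤ k
instance (nums : List Int) (k : Int) (target : Int) : Decidable (Pre_findAllIndices nums k target) := by unfold Pre_findAllIndices; infer_instance

def pvWitness_findAllIndices : List Int × Int × Int := ([1, 2, 1, 3], 2, 3)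

-- When k > len(nums) and sum(nums) == target, A returns [0] (its initial check sums the
-- silently-truncated slice nums[:k], i.e. the whole array) while B returns [] since no
-- window of length k exists; [] is the intended answer.
def D_findAllIndices (nums : List Int) (k : Int) (target : Int) : Prop :=
  (nums.length : Int) < k ∧ nums.sum = target
instance (nums : List Int) (k : Int) (target : Int) : Decidable (D_findAllIndices nums k target) := by unfold D_findAllIndices; infer_instance

def Spec_findAllIndices (nums : List Int) (k : Int) (target : Int) (out : List Int) : Prop := ¬ D_findAllIndices nums k target → out = findAllIndices_alt nums k target
instance (nums : List Int) (k : Int) (target : Int) (out : List Int) : Decidable (Spec_findAllIndices nums k target out) := by unfold Spec_findAllIndices; infer_instance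

def pvDiffWitness_findAllIndices : List Int × Int × Int := ([1], 2, 1)
def pvDiffWitnessOut_findAllIndices : (List Int) × (List Int) := ([0], [])

-- ===== CLAIM =====
def Claim_unchanged_findAllIndices : Prop := ∀ (nums : List Int) (k : Int) (target : Int), Dom_findAllIndices nums k target → Pre_findAllIndices nums k target → Spec_findAllIndices nums k target (findAllIndices nums k target)
def Claim_changed_findAllIndices : Prop := Dom_findAllIndices (pvDiffWitness_findAllIndices.1) (pvDiffWitness_findAllIndices.2.1) (pvDiffWitness_findAllIndices.2.2) ∧ Pre_findAllIndices (pvDiffWitness_findAllIndices.1) (pvDiffWitness_findAllIndices.2.1) (pvDiffWitness_findAllIndices.2.2) ∧ D_findAllIndices (pvDiffWitness_findAllIndices.1) (pvDiffWitness_findAllIndices.2.1) (pvDiffWitness_findAllIndices.2.2) ∧ findAllIndices (pvDiffWitness_findAllIndices.1) (pvDiffWitness_findAllIndices.2.1) (pvDiffWitness_findAllIndices.2.2) = pvDiffWitnessOut_findAllIndices.1 ∧ findAllIndices_alt (pvDiffWitness_findAllIndices.1) (pvDiffWitness_findAllIndices.2.1) (pvDiffWitness_findAllIndices.2.2) = pvDiffWitnessOut_findAllIndices.2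 ∧ pvDiffWitnessOut_findAllIndices.1 ≠ pvDiffWitnessOut_findAllIndices.2
def Claim_exact_findAllIndices : Prop := ∀ (nums : List Int) (k : Int) (target : Int), Dom_findAllIndices nums k target → Pre_findAllIndices nums k target → D_findAllIndices nums k target → findAllIndices nums k target ≠ findAllIndices_alt nums k target

-- ===== LEMMAS AND PROOFS =====

-- the prefix-sum table is the list of partial sums
theorem buildPrefix_foldl (nums p : List Int) (c : Int) (h : p.getLastD 0 = c) :
    nums.foldl (fun p x => p ++ [p.getLastD 0 + x]) p =
      p ++ (List.range nums.length).map (fun i => c + (nums.take (i+1)).sum) := by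
  induction nums generalizing p c with
  | nil => simp
  | cons x xs ih =>
    simp only [List.foldl_cons, h]
    rw [ih (p ++ [c + x]) (c + x) (by simp)]
    simp [List.range_succ_eq_map, List.map_map, Function.comp_def, add_assoc]

theorem buildPrefix_eq (nums : List Int) :
    buildPrefix nums = (List.range (nums.length + 1)).map (fun i => (nums.take i).sum) := by
  rw [buildPrefix, buildPrefix_foldl nums [0] 0 rfl]
  simp [List.range_succ_eq_map, List.map_map, Function.comp_def]

theorem pyGetD_buildPrefix (nums : List Int) (i : Int) (h0 : 0 ≤ i) (h1 : i ≤ (nums.length : Int)) :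
    PySem.List.pyGetD (buildPrefix nums) i 0 = (nums.take i.toNat).sum := by
  rw [buildPrefix_eq, PySem.List.pyGetD_eq_getElem _ _ h0 (by simp; omega)]
  simp

theorem pyGet?_some (nums : List Int) (i : Int) (h0 : 0 ≤ i) (h1 : i < (nums.length : Int)) :
    PySem.List.pyGet? nums i = some (nums[i.toNat]'(by omega)) := by
  have h2 := PySem.List.pyGet?_natCast nums i.toNat
  rw [Int.toNat_of_nonneg h0] at h2
  rw [h2]
  exact List.getElem?_eq_getElem (by omega)

-- A's loop, started at position `left` with the correct running window sum, produces
-- exactly the append-if fold over the remaining start indices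
theorem loopA_eq (nums : List Int) (k target : Int) (hk : 0 ≤ k) :
    ∀ (fuel : Nat) (left : Int) (result : List Int), 0 ≤ left →
      left + k + (fuel : Int) = (nums.length : Int) →
      findAllIndicesLoop nums target fuel
          ((nums.take (left + k).toNat).sum - (nums.take left.toNat).sum) left (left + k) result
        = (PySem.List.pyRange (left + 1) ((nums.length : Int) - k + 1) 1).foldl
            (fun r s =>
              if (nums.take (s + k).toNat).sum - (nums.take s.toNat).sum = target
              then r ++ [s] else r) result := by
  intro fuel
  induction fuel with
  | zero =>
    intro left result hl hsum
    rw [PySem.List.pyRange_one_eq_nil (by omega)]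
    rfl
  | succ fuel ih =>
    intro left result hl hsum
    have hln : left < (nums.length : Int) := by omega
    have hrn : left + k < (nums.length : Int) := by omega
    rw [findAllIndicesLoop, pyGet?_some nums left hl hln,
        pyGet?_some nums (left + k) (by omega) hrn]
    simp only
    have ht : (nums.take (left + k).toNat).sum - (nums.take left.toNat).sum
        - nums[left.toNat]'(by omega) + nums[(left + k).toNat]'(by omega)
        = (nums.take (left + 1 + k).toNat).sum - (nums.take (left + 1).toNat).sum := by
      have e1 : (left + 1 + k).toNat = (left + k).toNat + 1 := by omega
      have e2 : (left + 1).toNat = left.toNat + 1 := by omega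
      rw [e1, e2, List.sum_take_succ nums (left + k).toNat (by omega),
          List.sum_take_succ nums left.toNat (by omega)]
      ring
    rw [ht]
    have e3 : left + k + 1 = left + 1 + k := by ring
    rw [e3]
    rw [ih (left + 1) (if (nums.take (left + 1 + k).toNat).sum - (nums.take (left + 1).toNat).sum = target then result ++ [left + 1] else result) (by omega) (by omega)]
    rw [PySem.List.pyRange_one_cons (show left + 1 < (nums.length : Int) - k + 1 by omega), List.foldl_cons]

-- B's filter over the full range, window sums written via the prefix table
theorem alt_eq_filter (nums : List Int) (k target : Int) (hk : 0 ≤ k) :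
    findAllIndices_alt nums k target =
      (PySem.List.pyRange 0 ((nums.length : Int) - k + 1) 1).filter
        (fun s => decide ((nums.take (s + k).toNat).sum - (nums.take s.toNat).sum = target)) := by
  unfold findAllIndices_alt
  simp only
  apply List.filter_congr
  intro s hs
  rw [PySem.List.mem_pyRange_one] at hs
  by_cases hkn : k ≤ (nums.length : Int)
  · rw [pyGetD_buildPrefix nums (s + k) (by omega) (by omega),
        pyGetD_buildPrefix nums s (by omega) (by omega)]
  · omega
-- (when k > len nums the range is empty, so the congruence hypothesis is vacuous)

-- ===== VERDICT =====
theorem findAllIndices_spec : Claim_unchanged_findAllIndices := by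
  intro nums k target _ hk hnd
  unfold Pre_findAllIndices at hk
  unfold D_findAllIndices at hnd
  show findAllIndices nums k target = findAllIndices_alt nums k target
  unfold findAllIndices
  simp only
  rw [PySem.List.slice_to _ hk, alt_eq_filter nums k target hk]
  by_cases hkn : k ≤ (nums.length : Int)
  · have h0 : (0 : Int) + k = k := by ring
    have := loopA_eq nums k target hk ((nums.length : Int) - k).toNat 0
      (if (nums.take k.toNat).sum = target then [0] else []) (by omega) (by omega)
    rw [h0] at this
    simp only [Int.toNat_zero, List.take_zero, List.sum_nil, sub_zero] at this
    rw [this, PySem.List.pyRange_one_cons (show (0:Int) < (nums.length : Int) - k + 1 by omega),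
        List.filter_cons]
    simp only [Int.toNat_zero, List.take_zero, List.sum_nil, zero_add, sub_zero]
    rw [PySem.List.foldl_append_ite_eq_filter]
    by_cases hft : (nums.take k.toNat).sum = target
    · simp [hft]
    · simp [hft]
  · -- k > n: loop fuel is 0 and (since ¬D_) the whole-array check fails; B's range is empty
    have hsum : nums.sum ≠ target := fun h => hnd ⟨by omega, h⟩
    have hfz : ((nums.length : Int) - k).toNat = 0 := by omega
    have htk : nums.take k.toNat = nums := List.take_of_length_le (by omega)
    rw [hfz, htk, if_neg hsum, PySem.List.pyRange_one_eq_nil (by omega)]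
    rfl

theorem findAllIndices_changed : Claim_changed_findAllIndices := by
  unfold Claim_changed_findAllIndices; decide

theorem findAllIndices_tight : Claim_exact_findAllIndices := by
  intro nums k target _ hk hd
  unfold Pre_findAllIndices at hk
  obtain ⟨hkn, hsum⟩ := hd
  have hA : findAllIndices nums k target = [0] := by
    unfold findAllIndices
    simp only
    rw [PySem.List.slice_to _ hk, List.take_of_length_le (by omega : nums.length ≤ k.toNat),
        if_pos hsum]
    have hfz : ((nums.length : Int) - k).toNat = 0 := by omega
    rw [hfz]
    rfl
  have hB : findAllIndices_alt nums k target = [] := by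
    unfold findAllIndices_alt
    simp only
    rw [PySem.List.pyRange_one_eq_nil (by omega)]
    rfl
  rw [hA, hB]
  simp
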